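-- pv_equiv track=rewrite | github.com/TheGringo-ai/ElGringo | dashboard/app.py | get_data_summary
-- ===== SOURCE A (Python) =====
-- def get_data_summary(data: list, sample_size: int = 30) -> str:
--     """Create data summary for AI."""
--     if not data:
--         return "No data"
--
--     headers = list(data[0].keys())
--     sample = data[:sample_size]
--
--     summary = f"""
-- CMMS DATA SUMMARY
-- =================
-- Total Records: {len(data):,}
-- Columns ({len(headers)}): {', '.join(headers)}
--
-- SAMPLE DATA (first {len(sample)} rows):
-- """
--     for i, row in enumerate(sample[:10]):
--         summary += f"\nRow {i+1}:\n"
--         for k, v in row.items():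
--             if v and str(v).strip():
--                 summary += f"  {k}: {str(v)[:80]}\n"
--
--     summary += "\n\nCOLUMN STATISTICS:\n"
--     for col in headers:
--         values = [str(r.get(col, '')) for r in data if str(r.get(col, '')).strip()]
--         unique = len(set(values))
--         summary += f"  {col}: {len(values):,} filled, {unique:,} unique\n"
--
--     return summary
-- ===== SOURCE B (Python) =====
-- def get_data_summary(data: list, sample_size: int = 30) -> str:
--     """Create data summary for AI (single-pass column statistics)."""
--     if not data:
--         return "No data"
--
--     headers = list(data[0].keys())
--     sample = data[:sample_size]
--
--     summary = f"""
-- CMMS DATA SUMMARY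
-- =================
-- Total Records: {len(data):,}
-- Columns ({len(headers)}): {', '.join(headers)}
--
-- SAMPLE DATA (first {len(sample)} rows):
-- """
--     for i, row in enumerate(sample[:10]):
--         summary += f"\nRow {i+1}:\n"
--         for k, v in row.items():
--             if v and str(v).strip():
--                 summary += f"  {k}: {str(v)[:80]}\n"
--
--     summary += "\n\nCOLUMN STATISTICS:\n"
--     # one pass over the data, per-column accumulators [filled_count, unique_values]
--     stats = [[0, set()] for _ in headers]
--     for r in data:
--         for st, col in zip(stats, headers):
--             v = str(r.get(col, ''))
--             if v.strip():
--                 st[0] += 1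
--                 st[1].add(v)
--     for col, st in zip(headers, stats):
--         summary += f"  {col}: {st[0]:,} filled, {len(st[1]):,} unique\n"
--     return summary
-- ===== Notes on version B (the rewrite author's own statement) =====
-- stated objective: alternative
-- what changed: The COLUMN STATISTICS section no longer rebuilds a full per-column value list by scanning all of data once per header; B makes a single row-major pass over data maintaining a [filled-count, unique-value-set] accumulator for each header, then emits the lines from those accumulators.
import Mathlib
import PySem

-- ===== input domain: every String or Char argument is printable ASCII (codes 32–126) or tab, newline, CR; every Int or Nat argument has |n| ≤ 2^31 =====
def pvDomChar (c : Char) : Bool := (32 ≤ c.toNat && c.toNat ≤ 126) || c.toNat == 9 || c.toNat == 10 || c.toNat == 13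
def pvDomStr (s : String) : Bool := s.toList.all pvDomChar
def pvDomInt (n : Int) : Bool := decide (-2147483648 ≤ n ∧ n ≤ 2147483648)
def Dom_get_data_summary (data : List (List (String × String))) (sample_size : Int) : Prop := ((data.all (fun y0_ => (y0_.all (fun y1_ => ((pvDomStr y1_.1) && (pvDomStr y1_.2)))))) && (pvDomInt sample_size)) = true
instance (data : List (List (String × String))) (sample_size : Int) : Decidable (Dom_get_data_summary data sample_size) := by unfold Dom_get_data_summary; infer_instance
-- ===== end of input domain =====

-- B replaces A's per-column full scans of `data` with one row-major pass that keeps a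
-- [filled-count, unique-set] accumulator per header (objective: alternative single-pass algorithm).

-- shared helper: f"{n:,}" (thousands separators); works on the reversed digit list
def commaRev : List Char → List Char
  | a :: b :: c :: d :: t => a :: b :: c :: ',' :: commaRev (d :: t)
  | l => l

def pyCommaInt (n : Int) : String :=
  (if n < 0 then "-" else "") ++ String.ofList (commaRev (PySem.Int.toChars (n.natAbs : Int)).reverse).reverse

-- shared helper: the header + sample-rows part (identical source lines in A and B)
def summaryPrefix (rows : List (PySem.Dict String String)) (headers : List String)
    (sample_size : Int) : String :=
  let sample := PySem.List.slice rows none (some sample_size)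
  let summary :=
    "\nCMMS DATA SUMMARY\n=================\nTotal Records: " ++ pyCommaInt (rows.length : Int) ++
    "\nColumns (" ++ PySem.Int.toStr (headers.length : Int) ++ "): " ++ PySem.Str.join ", " headers ++
    "\n\nSAMPLE DATA (first " ++ PySem.Int.toStr (sample.length : Int) ++ " rows):\n"
  let summary :=
    (PySem.List.enumerate (PySem.List.slice sample none (some 10))).foldl
      (fun acc p =>
        p.2.items.foldl
          (fun acc2 kv =>
            if kv.2 ≠ "" ∧ PySem.Str.strip kv.2 ≠ "" then
              acc2 ++ "  " ++ kv.1 ++ ": " ++ PySem.Str.slice kv.2 none (some 80) ++ "\n"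
            else acc2)
          (acc ++ "\nRow " ++ PySem.Int.toStr (p.1 + 1) ++ ":\n"))
      summary
  summary ++ "\n\nCOLUMN STATISTICS:\n"

-- ===== PORT A =====
def get_data_summary (data : List (List (String × String))) (sample_size : Int) : String :=
  if data = [] then "No data"
  else
    let rows := data.map (fun r => PySem.Dict.ofList r)
    let headers := (rows.headD PySem.Dict.empty).keys
    let summary := summaryPrefix rows headers sample_size
    -- for col in headers: values = [...]; unique = len(set(values)); summary += line
    headers.foldl
      (fun acc col =>
        let values := (rows.map (fun r => r.getD col "")).filter (fun v => PySem.Str.strip v ≠ "")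
        let unique := (PySem.Set.ofList values).length
        acc ++ "  " ++ col ++ ": " ++ pyCommaInt (values.length : Int) ++ " filled, " ++
          pyCommaInt (unique : Int) ++ " unique\n")
      summary

-- ===== PORT B =====
def get_data_summary_alt (data : List (List (String × String))) (sample_size : Int) : String :=
  if data = [] then "No data"
  else
    let rows := data.map (fun r => PySem.Dict.ofList r)
    let headers := (rows.headD PySem.Dict.empty).keys
    let summary := summaryPrefix rows headers sample_size
    -- stats = [[0, set()] for _ in headers]; one pass over rows updating each column's pair
    let stats : List (Int × PySem.Set String) := headers.map (fun _ => ((0 : Int), PySem.Set.empty))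
    let stats :=
      rows.foldl
        (fun stats r =>
          (stats.zip headers).map
            (fun p =>
              let v := r.getD p.2 ""
              if PySem.Str.strip v ≠ "" then (p.1.1 + 1, PySem.Set.add p.1.2 v) else p.1))
        stats
    -- for col, st in zip(headers, stats): summary += line
    (headers.zip stats).foldl
      (fun acc p =>
        acc ++ "  " ++ p.1 ++ ": " ++ pyCommaInt p.2.1 ++ " filled, " ++
          pyCommaInt (PySem.Set.len p.2.2) ++ " unique\n")
      summary

-- ===== PRECONDITION & SPEC =====
def Spec_get_data_summary (data : List (List (String × String))) (sample_size : Int) (out : String) : Prop := out = get_data_summary_alt data sample_size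
instance (data : List (List (String × String))) (sample_size : Int) (out : String) : Decidable (Spec_get_data_summary data sample_size out) := by unfold Spec_get_data_summary; infer_instance

-- ===== CLAIM (what is proved, stated in full; the proofs are below) =====
def Claim_equal_get_data_summary : Prop := ∀ (data : List (List (String × String))) (sample_size : Int), Dom_get_data_summary data sample_size → Spec_get_data_summary data sample_size (get_data_summary data sample_size)

-- ===== LEMMAS AND PROOFS =====

-- zipping a list with its own map pairs elements pointwise
lemma zip_map_self {α σ : Type} (hs : List α) (m : α → σ) :
    (hs.map m).zip hs = hs.map (fun h => (m h, h)) := by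
  induction hs with
  | nil => rfl
  | cons h t ih => simp [ih]

lemma zip_map_self' {α σ : Type} (hs : List α) (m : α → σ) :
    hs.zip (hs.map m) = hs.map (fun h => (h, m h)) := by
  induction hs with
  | nil => rfl
  | cons h t ih => simp [ih]

-- a row-major fold over per-column states (kept as a map over headers) is the
-- per-column fold, column by column
lemma foldl_zip_map {α σ ρ : Type} (hs : List α) (u : σ → α → ρ → σ) :
    ∀ (l : List ρ) (m : α → σ),
      l.foldl (fun s r => (s.zip hs).map (fun p => u p.1 p.2 r)) (hs.map m)
        = hs.map (fun h => l.foldl (fun st r => u st h r) (m h)) := by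
  intro l
  induction l with
  | nil => intro m; rfl
  | cons r t ih =>
    intro m
    have h1 : (hs.map m).zip hs = hs.map (fun h => (m h, h)) := zip_map_self hs m
    simp only [List.foldl_cons, h1, List.map_map]
    exact ih (fun h => u (m h) h r)

-- the per-column accumulator fold computes (count of filled values, their set)
lemma percol_fold (col : String) :
    ∀ (l : List (PySem.Dict String String)) (c : Int) (s : PySem.Set String),
      l.foldl
          (fun (st : Int × PySem.Set String) r =>
            let v := r.getD col ""
            if PySem.Str.strip v ≠ "" then (st.1 + 1, PySem.Set.add st.2 v) else st)
          (c, s)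
        = (c + (((l.map (fun r => r.getD col "")).filter (fun v => PySem.Str.strip v ≠ "")).length : Int),
           ((l.map (fun r => r.getD col "")).filter (fun v => PySem.Str.strip v ≠ "")).foldl PySem.Set.add s) := by
  intro l
  induction l with
  | nil => intro c s; simp
  | cons r t ih =>
    intro c s
    simp only [List.foldl_cons, List.map_cons, List.filter_cons]
    by_cases h : PySem.Str.strip (r.getD col "") ≠ ""
    · have hd : decide (PySem.Str.strip (r.getD col "") ≠ "") = true := by simpa using h
      simp only [if_pos h, hd, if_true, ih, List.length_cons, List.foldl_cons, Prod.mk.injEq]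
      exact ⟨by push_cast; ring, trivial⟩
    · have hd : decide (PySem.Str.strip (r.getD col "") ≠ "") = false := by simpa using h
      simp only [if_neg h, hd, Bool.false_eq_true, if_false, ih]

-- the two column-statistics loops produce the same string from any prefix
lemma stats_eq (rows : List (PySem.Dict String String)) (headers : List String) (pre : String) :
    headers.foldl
        (fun acc col =>
          let values := (rows.map (fun r => r.getD col "")).filter (fun v => PySem.Str.strip v ≠ "")
          let unique := (PySem.Set.ofList values).length
          acc ++ "  " ++ col ++ ": " ++ pyCommaInt (values.length : Int) ++ " filled, " ++
            pyCommaInt (unique : Int) ++ " unique\n")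
        pre
      = (headers.zip
            (rows.foldl
              (fun (stats : List (Int × PySem.Set String)) r =>
                (stats.zip headers).map
                  (fun p =>
                    let v := r.getD p.2 ""
                    if PySem.Str.strip v ≠ "" then (p.1.1 + 1, PySem.Set.add p.1.2 v) else p.1))
              (headers.map (fun _ => ((0 : Int), PySem.Set.empty))))).foldl
          (fun acc p =>
            acc ++ "  " ++ p.1 ++ ": " ++ pyCommaInt p.2.1 ++ " filled, " ++
              pyCommaInt (PySem.Set.len p.2.2) ++ " unique\n")
          pre := by
  rw [foldl_zip_map headers
      (fun (st : Int × PySem.Set String) col r =>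
        let v := r.getD col ""
        if PySem.Str.strip v ≠ "" then (st.1 + 1, PySem.Set.add st.2 v) else st)
      rows (fun _ => ((0 : Int), PySem.Set.empty))]
  rw [zip_map_self' headers, List.foldl_map]
  apply PySem.List.foldl_congr_mem
  intro acc col _
  simp only [percol_fold col rows 0 PySem.Set.empty, zero_add]
  rw [PySem.Set.ofList_eq_foldl]
  rfl

-- ===== VERDICT (by name: the statement is the Claim_ definition above) =====
theorem get_data_summary_spec : Claim_equal_get_data_summary := by
  intro data sample_size _
  unfold Spec_get_data_summary get_data_summary get_data_summary_alt
  by_cases h : data = []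
  · simp [h]
  · simp only [h, if_false]
    exact stats_eq _ _ _
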